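-- pv_equiv track=rewrite | github.com/yintaophy2/ForTestOnly | ms100.py | findCountList
-- ===== SOURCE A (Python) =====
-- def findCountList(aList):
--     maxCount=[9,2,2,2,2,2,2,0,0,0]#maxCount还可以再优化，不过已经算得很快了
--     # maxCount=[9,9,9,9,9,1,1,0,0,0]#如果这个maxcout 没那么好，计算时间就会增加很多
--     countList=[0]*len(aList)
--     def checkResultIsOk(aList,countList):
--         for i in range(len(countList)):
--             if countList.count(aList[i])!=countList[i]:
--                 return False
--         # print (i,countList.count(aList[i]),countList[i])
--         return True
--
--     def findCountListOfIndex(aList,index,countList):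
--         if checkResultIsOk(aList,countList):
--             return True
--         if index>=len(aList):
--             return
--         for i in range(maxCount[index]+1):
--             # print (maxCount[index]+1)
--             countList[index]=i
--             # print (countList)
--             if(findCountListOfIndex(aList,index+1,countList)):
--                 return True
--         return False
--
--     findCountListOfIndex(aList,0,countList)
--     return countList
-- ===== SOURCE B (Python) =====
-- def findCountList(aList):
--     maxCount = [9, 2, 2, 2, 2, 2, 2, 0, 0, 0]
--     n = len(aList)
--     countList = [0] * n
--
--     def checkResultIsOk():
--         for i in range(n):
--             if countList.count(aList[i]) != countList[i]:
--                 return False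
--         return True
--
--     # explicit-stack DFS replacing the recursion; ops are ('visit', index)
--     # (enter a node: check, maybe expand) and ('set', index, i)
--     # (perform the assignment countList[index] = i, then visit index+1).
--     # Children are pushed with i descending so they are popped ascending,
--     # giving exactly the recursive visit order; countList is the single
--     # shared, never-reset state.
--     stack = [('visit', 0)]
--     while stack:
--         op = stack.pop()
--         if op[0] == 'visit':
--             index = op[1]
--             if checkResultIsOk():
--                 break
--             if index >= n:
--                 continue
--             for i in range(maxCount[index], -1, -1):
--                 stack.append(('set', index, i))
--         else:
--             _, index, i = op
--             countList[index] = i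
--             stack.append(('visit', index + 1))
--     return countList
-- ===== Notes on version B (the rewrite author's own statement) =====
-- stated objective: alternative
-- what changed: The recursive backtracking findCountListOfIndex is replaced by an explicit-stack (worklist) DFS with visit/set operations over the same shared, never-reset countList, visiting nodes in the identical order.
import Mathlib
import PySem

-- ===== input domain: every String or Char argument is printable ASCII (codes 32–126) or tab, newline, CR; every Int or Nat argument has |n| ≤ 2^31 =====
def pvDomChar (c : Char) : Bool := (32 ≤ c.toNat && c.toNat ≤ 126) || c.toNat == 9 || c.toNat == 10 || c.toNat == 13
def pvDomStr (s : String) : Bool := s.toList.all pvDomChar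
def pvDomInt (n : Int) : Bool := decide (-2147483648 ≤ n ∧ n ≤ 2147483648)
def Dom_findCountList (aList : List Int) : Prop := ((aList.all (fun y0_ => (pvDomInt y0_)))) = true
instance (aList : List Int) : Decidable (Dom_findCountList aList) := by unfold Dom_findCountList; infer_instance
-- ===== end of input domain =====

-- B replaces the recursive backtracking by an explicit-stack DFS worklist with the
-- same visit order and the same shared, never-reset countList state (objective: alternative).

-- ===== PORT A =====

def pvMaxCount : List Int := [9, 2, 2, 2, 2, 2, 2, 0, 0, 0]

-- checkResultIsOk: at every call site countList has the same length as aList, so the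
-- indices i < len(countList) are in range for both lists and List.getD is exact.
def pvCheckOk (aList countList : List Int) : Bool :=
  (List.range countList.length).all fun i =>
    PySem.List.count countList (aList.getD i 0) == countList.getD i 0

-- findCountListOfIndex, state-passing: (returned truthiness, mutated countList).
-- The for-loop over range(maxCount[index]+1) with early 'return True' is the foldl
-- that keeps the result once its flag is true.  maxCount[index] is in range for every
-- input admitted by Pre_ (index < len(aList) ≤ 10, or the first check succeeds and the
-- access is never reached), so List.getD is exact there; outside Pre_ Python raises
-- IndexError.  Fuel aList.length+1 covers every reachable depth (index stops at len).
def pvGoA (aList : List Int) : Nat → Nat → List Int → Bool × List Int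
  | 0, _, cl => (false, cl)
  | g + 1, index, cl =>
    if pvCheckOk aList cl then (true, cl)
    else if aList.length ≤ index then (false, cl)
    else
      (List.range ((pvMaxCount.getD index 0).toNat + 1)).foldl
        (fun r (i : Nat) => if r.1 then r else pvGoA aList g (index + 1) (r.2.set index (i : Int)))
        (false, cl)

def findCountList (aList : List Int) : List Int :=
  (pvGoA aList (aList.length + 1) 0 (List.replicate aList.length 0)).2

-- ===== PORT B =====

-- worklist operations of Source B: ('visit', index) and ('set', index, i)
inductive PvOp where
  | visit (index : Nat)
  | set (index : Nat) (i : Int)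
deriving DecidableEq, Repr

-- the while-stack loop of Source B; the list head is the stack top.  Source B pushes the
-- ('set', index, i) children with i descending so they are popped ascending, which is
-- exactly prepending the ascending mapped list here.  The while loop terminates; the
-- fuel 11^(len+1) chosen in findCountList_alt bounds its number of iterations.
def pvRunB (aList : List Int) : Nat → List PvOp → List Int → List Int
  | 0, _, cl => cl
  | _ + 1, [], cl => cl
  | f + 1, PvOp.visit index :: rest, cl =>
    if pvCheckOk aList cl then cl
    else if aList.length ≤ index then pvRunB aList f rest cl
    else
      pvRunB aList f
        (((List.range ((pvMaxCount.getD index 0).toNat + 1)).map fun (i : Nat) => PvOp.set index (i : Int)) ++ rest)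
        cl
  | f + 1, PvOp.set index i :: rest, cl =>
    pvRunB aList f (PvOp.visit (index + 1) :: rest) (cl.set index i)

def findCountList_alt (aList : List Int) : List Int :=
  pvRunB aList (11 ^ (aList.length + 1)) [PvOp.visit 0] (List.replicate aList.length 0)

-- ===== PRECONDITION & SPEC =====
-- Pre_ excludes exactly the inputs on which Python A raises IndexError (maxCount[10]):
-- lists longer than 10 containing a 0 (with no 0 the very first check succeeds on the
-- all-zero countList and maxCount is never indexed).  B raises there too.
def Pre_findCountList (aList : List Int) : Prop :=
  ¬ (10 < aList.length ∧ (0 : Int) ∈ aList)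
instance (aList : List Int) : Decidable (Pre_findCountList aList) := by
  unfold Pre_findCountList; infer_instance

def pvWitness_findCountList : List Int := [1, 2, 1]

def Spec_findCountList (aList : List Int) (out : List Int) : Prop := out = findCountList_alt aList
instance (aList : List Int) (out : List Int) : Decidable (Spec_findCountList aList out) := by unfold Spec_findCountList; infer_instance

-- ===== CLAIM (what is proved, stated in full; the proofs are below) =====
def Claim_equal_findCountList : Prop := ∀ (aList : List Int), Dom_findCountList aList → Pre_findCountList aList → Spec_findCountList aList (findCountList aList)

-- ===== LEMMAS AND PROOFS =====

-- fuel cost (number of pops) of fully processing the subtree of a 'visit index' op,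
-- for search depth budget k over a list of length len
def pvW (len : Nat) : Nat → Nat → Nat
  | 0, _ => 1
  | k + 1, index =>
    if len ≤ index then 1
    else 1 + ((pvMaxCount.getD index 0).toNat + 1) * (1 + pvW len k (index + 1))

theorem pvMaxCount_getD_le (index : Nat) : (pvMaxCount.getD index 0).toNat ≤ 9 := by
  rcases index with _|_|_|_|_|_|_|_|_|_|n <;> simp [pvMaxCount, List.getD]

theorem pvW_le (len : Nat) : ∀ k index, pvW len k index ≤ 11 ^ (k + 1) := by
  intro k
  induction k with
  | zero => intro index; simp [pvW]
  | succ k ih =>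
    intro index
    unfold pvW
    split
    · exact Nat.one_le_pow _ _ (by norm_num)
    · have h1 : ((pvMaxCount.getD index 0).toNat + 1) ≤ 10 := by
        have := pvMaxCount_getD_le index; omega
      have h2 := ih (index + 1)
      calc 1 + ((pvMaxCount.getD index 0).toNat + 1) * (1 + pvW len k (index + 1))
          ≤ 1 + 10 * (1 + 11 ^ (k + 1)) := by
            exact Nat.add_le_add_left (Nat.mul_le_mul h1 (Nat.add_le_add_left h2 1)) 1
        _ ≤ 11 ^ (k + 2) := by
            have : (11:Nat) ≤ 11 ^ (k + 1) := by
              calc (11:Nat) = 11 ^ 1 := (pow_one 11).symm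
                _ ≤ 11 ^ (k + 1) := Nat.pow_le_pow_right (by norm_num) (by omega)
            have e : (11:Nat) ^ (k + 2) = 11 * 11 ^ (k + 1) := by ring
            omega

theorem pvRunB_nil (aList : List Int) (f : Nat) (cl : List Int) :
    pvRunB aList f [] cl = cl := by
  cases f <;> simp [pvRunB]

theorem pvFoldl_true (aList : List Int) (g index : Nat) (is : List Nat)
    (r : Bool × List Int) (hr : r.1 = true) :
    is.foldl (fun r (i : Nat) => if r.1 then r else pvGoA aList g (index + 1) (r.2.set index (i : Int))) r = r := by
  induction is with
  | nil => rfl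
  | cons i is ih => simp [List.foldl, hr, ih]

-- the simulation: running the stack machine on a 'visit index' op computes exactly the
-- recursive search pvGoA (k+1) on the same state, then continues with the rest of the stack
theorem pvVisit_sim (aList : List Int) :
    ∀ (k index : Nat), aList.length ≤ index + k →
    ∀ (cl : List Int) (rest : List PvOp) (f : Nat),
      pvRunB aList (f + pvW aList.length k index) (PvOp.visit index :: rest) cl =
        (let r := pvGoA aList (k + 1) index cl
         if r.1 then r.2 else pvRunB aList f rest r.2) := by
  intro k
  induction k with
  | zero =>
    intro index hlen cl rest f
    have hlen0 : aList.length ≤ index := by omega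
    simp only [pvW]
    show pvRunB aList (f + 1) (PvOp.visit index :: rest) cl = _
    by_cases hc : pvCheckOk aList cl
    · simp [pvRunB, pvGoA, hc]
    · simp [pvRunB, pvGoA, hc, hlen0]
  | succ k ih =>
    intro index hlen cl rest f
    by_cases hidx : aList.length ≤ index
    · simp only [pvW, if_pos hidx]
      show pvRunB aList (f + 1) (PvOp.visit index :: rest) cl = _
      by_cases hc : pvCheckOk aList cl
      · simp [pvRunB, pvGoA, hc]
      · simp [pvRunB, pvGoA, hc, hidx]
    · -- index < len: expand the children
      have hlen' : aList.length ≤ (index + 1) + k := by omega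
      -- the set-list lemma, by induction on the list of i-values
      have hset : ∀ (is : List Nat) (cl : List Int) (f : Nat),
          pvRunB aList (f + is.length * (1 + pvW aList.length k (index + 1)))
              ((is.map fun (i : Nat) => PvOp.set index (i : Int)) ++ rest) cl =
            (let r := is.foldl
                (fun r (i : Nat) => if r.1 then r else pvGoA aList (k + 1) (index + 1) (r.2.set index (i : Int)))
                (false, cl)
             if r.1 then r.2 else pvRunB aList f rest r.2) := by
        intro is
        induction is with
        | nil =>
          intro cl f
          simp [List.foldl]
        | cons i is ihs =>
          intro cl f
          have efuel : f + (i :: is).length * (1 + pvW aList.length k (index + 1)) =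
              ((f + is.length * (1 + pvW aList.length k (index + 1))) + pvW aList.length k (index + 1)) + 1 := by
            simp [List.length_cons]; ring
          rw [efuel]
          show pvRunB aList _ (PvOp.set index (i : Int) :: _) cl = _
          rw [pvRunB]
          simp only [List.append_eq]
          rw [ih (index + 1) hlen' (cl.set index (i : Int))
              ((is.map fun (i : Nat) => PvOp.set index (i : Int)) ++ rest)
              (f + is.length * (1 + pvW aList.length k (index + 1)))]
          simp only [List.foldl]
          set r1 := pvGoA aList (k + 1) (index + 1) (cl.set index (i : Int)) with hr1
          by_cases hb : r1.1
          · simp [hb, pvFoldl_true aList (k + 1) index is r1 hb]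
          · have hb' : r1.1 = false := by
              cases hbv : r1.1 <;> simp [hbv] at hb ⊢
            have hr1eq : r1 = (false, r1.2) := by
              rw [← hb']
            rw [if_neg (by simp [hb']), hr1eq]
            exact ihs r1.2 f
      -- now the visit step itself
      simp only [pvW, if_neg hidx]
      have efuel : f + (1 + ((pvMaxCount.getD index 0).toNat + 1) * (1 + pvW aList.length k (index + 1))) =
          (f + ((pvMaxCount.getD index 0).toNat + 1) * (1 + pvW aList.length k (index + 1))) + 1 := by ring
      rw [efuel]
      by_cases hc : pvCheckOk aList cl
      · simp [pvRunB, pvGoA, hc]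
      · rw [pvRunB]
        simp only [hc, if_neg hidx, Bool.false_eq_true, if_false]
        have := hset (List.range ((pvMaxCount.getD index 0).toNat + 1)) cl f
        simp only [List.length_range] at this
        rw [this]
        show _ = (let r := pvGoA aList (k + 1 + 1) index cl; if r.1 then r.2 else pvRunB aList f rest r.2)
        simp [pvGoA, hc, hidx]

-- ===== VERDICT (by name: the statement is the Claim_ definition above) =====
theorem findCountList_spec : Claim_equal_findCountList := by
  intro aList _ _
  unfold Spec_findCountList findCountList findCountList_alt
  have hW := pvW_le aList.length aList.length 0
  have efuel : 11 ^ (aList.length + 1) =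
      (11 ^ (aList.length + 1) - pvW aList.length aList.length 0) + pvW aList.length aList.length 0 := by
    omega
  rw [efuel,
    pvVisit_sim aList aList.length 0 (by omega) (List.replicate aList.length 0) []
      (11 ^ (aList.length + 1) - pvW aList.length aList.length 0)]
  set r := pvGoA aList (aList.length + 1) 0 (List.replicate aList.length 0)
  by_cases hb : r.1 <;> simp [hb, pvRunB_nil]
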